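-- pv_equiv track=rewrite | github.com/Miracle-cl/Algorithms | BinarySearch/RangeSumSubarraySums.py | rangeSum
-- ===== SOURCE A (Python) =====
-- from typing import List
--
-- def rangeSum(nums: List[int], n: int, left: int, right: int) -> int:
--     # prefix sum & brute force: 356ms
--     mode = 10 ** 9 + 7
--     pre_sum = [0] + nums
--     for i in range(1, 1+n):
--         pre_sum[i] += pre_sum[i-1]
--
--     res = []
--     for i in range(n):
--         for j in range(i+1, n+1):
--             res.append(pre_sum[j] - pre_sum[i])
--     res.sort()
--     return sum(res[left-1: right]) % mode
-- ===== SOURCE B (Python) =====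
-- def rangeSum(nums, n, left, right):
--     # Different traversal: subarray sums grouped by END index, maintained as a
--     # rolling list of sums ending at j (no prefix-sum array, no index pairs).
--     mod = 10 ** 9 + 7
--     sums = []
--     ending = []  # sums of subarrays ending at the current index
--     for j in range(n):
--         ending = [s + nums[j] for s in ending]
--         ending.append(nums[j])
--         sums += ending
--     sums.sort()
--     return sum(sums[left - 1:right]) % mod
-- ===== Notes on version B (the rewrite author's own statement) =====
-- stated objective: alternative
-- what changed: B replaces A's in-place prefix-sum array plus the nested (start,end) index-pair scan by a rolling list of subarray sums grouped by end index (each step extends all sums ending at the previous index and adds the singleton), then sorts and slices as before.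
import Mathlib
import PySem

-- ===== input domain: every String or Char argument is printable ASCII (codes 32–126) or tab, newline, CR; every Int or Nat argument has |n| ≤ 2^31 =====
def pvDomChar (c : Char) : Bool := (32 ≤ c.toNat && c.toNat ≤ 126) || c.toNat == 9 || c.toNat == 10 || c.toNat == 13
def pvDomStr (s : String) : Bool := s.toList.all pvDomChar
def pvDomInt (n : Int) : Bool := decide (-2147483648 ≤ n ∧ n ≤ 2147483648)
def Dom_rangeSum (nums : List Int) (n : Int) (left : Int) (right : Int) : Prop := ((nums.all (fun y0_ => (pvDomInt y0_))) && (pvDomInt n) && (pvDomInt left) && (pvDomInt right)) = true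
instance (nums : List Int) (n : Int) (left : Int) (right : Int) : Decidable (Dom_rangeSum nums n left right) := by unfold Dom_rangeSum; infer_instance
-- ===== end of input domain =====

-- B replaces A's in-place prefix-sum array and nested (start,end) index-pair scan by a
-- rolling list of subarray sums grouped by end index; same sort-slice-sum afterwards.

-- ===== PORT A =====
def rangeSum (nums : List Int) (n : Int) (left : Int) (right : Int) : Int :=
  let mode : Int := 10 ^ 9 + 7
  let preSum0 : List Int := 0 :: nums
  -- for i in range(1, 1+n): pre_sum[i] += pre_sum[i-1]
  let preSum : List Int := (PySem.List.pyRange 1 (1 + n) 1).foldl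
    (fun ps i => PySem.List.pySetD ps i (PySem.List.pyGetD ps i 0 + PySem.List.pyGetD ps (i - 1) 0))
    preSum0
  -- nested loops appending pre_sum[j] - pre_sum[i]
  let res : List Int := (PySem.List.pyRange 0 n 1).foldl
    (fun acc i => (PySem.List.pyRange (i + 1) (n + 1) 1).foldl
      (fun acc2 j => acc2 ++ [PySem.List.pyGetD preSum j 0 - PySem.List.pyGetD preSum i 0]) acc)
    []
  let resS := PySem.List.sorted res (fun x => x) false
  PySem.Int.mod (PySem.List.slice resS (some (left - 1)) (some right)).sum mode

-- ===== PORT B =====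
def rangeSum_alt (nums : List Int) (n : Int) (left : Int) (right : Int) : Int :=
  let md : Int := 10 ^ 9 + 7
  -- state: (sums, ending) — ending = sums of subarrays ending at the current index
  let st : List Int × List Int := (PySem.List.pyRange 0 n 1).foldl
    (fun st j =>
      let x := PySem.List.pyGetD nums j 0
      let ending := st.2.map (fun s => s + x) ++ [x]
      (st.1 ++ ending, ending))
    ([], [])
  let sums := PySem.List.sorted st.1 (fun x => x) false
  PySem.Int.mod (PySem.List.slice sums (some (left - 1)) (some right)).sum md

-- ===== PRECONDITION & SPEC =====
-- Pre_ excludes exactly n > len(nums), where both Pythons raise IndexError.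
def Pre_rangeSum (nums : List Int) (n : Int) (left : Int) (right : Int) : Prop :=
  n ≤ (nums.length : Int)
instance (nums : List Int) (n : Int) (left : Int) (right : Int) : Decidable (Pre_rangeSum nums n left right) := by unfold Pre_rangeSum; infer_instance
def pvWitness_rangeSum : List Int × Int × Int × Int := ([1, 2, 3, 4], 4, 1, 5)

def Spec_rangeSum (nums : List Int) (n : Int) (left : Int) (right : Int) (out : Int) : Prop := out = rangeSum_alt nums n left right
instance (nums : List Int) (n : Int) (left : Int) (right : Int) (out : Int) : Decidable (Spec_rangeSum nums n left right out) := by unfold Spec_rangeSum; infer_instance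

-- ===== CLAIM (what is proved, stated in full; the proofs are below) =====
def Claim_equal_rangeSum : Prop := ∀ (nums : List Int) (n : Int) (left : Int) (right : Int), Dom_rangeSum nums n left right → Pre_rangeSum nums n left right → Spec_rangeSum nums n left right (rangeSum nums n left right)

-- ===== LEMMAS AND PROOFS =====

-- prefix sum of the first k elements
def pvS (nums : List Int) (k : Nat) : Int := (nums.take k).sum

-- A's multiset of subarray sums, grouped by start index
def pvF (nums : List Int) (m : Nat) : List Int :=
  (List.range m).flatMap (fun i => (List.range (m - i)).map (fun t => pvS nums (i + 1 + t) - pvS nums i))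

-- B's "ending" list after processing the first m elements
def pvE (nums : List Int) (m : Nat) : List Int :=
  (List.range m).map (fun i => pvS nums m - pvS nums i)

-- B's multiset of subarray sums, grouped by end index
def pvB (nums : List Int) (m : Nat) : List Int :=
  (List.range m).flatMap (fun j => pvE nums (j + 1))

theorem pvS_succ (nums : List Int) (m : Nat) (h : m < nums.length) :
    pvS nums (m + 1) = pvS nums m + nums[m] := by
  unfold pvS
  rw [List.take_add_one, List.sum_append, List.getElem?_eq_getElem h]
  simp

-- characterization of A's mutated prefix-sum list
theorem pre_char (nums : List Int) (m : Nat) (hm : m ≤ nums.length) :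
    (PySem.List.pyRange 1 (1 + (m : Int)) 1).foldl
      (fun ps i => PySem.List.pySetD ps i (PySem.List.pyGetD ps i 0 + PySem.List.pyGetD ps (i - 1) 0))
      (0 :: nums)
    = (List.range (m + 1)).map (pvS nums) ++ nums.drop m := by
  induction m with
  | zero => simp [PySem.List.pyRange_one_eq_nil (by omega : (1:Int) ≤ 1), pvS]
  | succ m ih =>
    have hm' : m <= nums.length := by omega
    have hlt : m < nums.length := by omega
    have hsplit : (1 : Int) + ((m : Nat) + 1 : Nat) = (1 + (m : Int)) + 1 := by push_cast; ring
    rw [hsplit, PySem.List.pyRange_one_succ_right (by omega : (1:Int) <= 1 + (m:Int)),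
        List.foldl_append, ih hm']
    have hcast : (1 + (m : Int)) = ((m + 1 : Nat) : Int) := by push_cast; ring
    simp only [List.foldl_cons, List.foldl_nil, hcast, PySem.List.pyGetD_natCast,
      PySem.List.pySetD_natCast]
    have hcast' : ((m + 1 : Nat) : Int) - 1 = ((m : Nat) : Int) := by push_cast; ring
    rw [hcast', PySem.List.pyGetD_natCast]
    have hdrop : nums.drop m = nums[m] :: nums.drop (m + 1) := List.drop_eq_getElem_cons hlt
    have hlen : ((List.range (m + 1)).map (pvS nums)).length = m + 1 := by simp
    have hget1 : ((List.range (m + 1)).map (pvS nums) ++ nums.drop m).getD (m + 1) 0 = nums[m] := by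
      rw [hdrop, List.getD_eq_getElem?_getD, List.getElem?_append_right (by simp)]
      simp [List.getElem?_eq_getElem hlt]
    have hget2 : ((List.range (m + 1)).map (pvS nums) ++ nums.drop m).getD m 0 = pvS nums m := by
      rw [List.getD_eq_getElem?_getD, List.getElem?_append_left (by simp)]
      simp
    rw [hget1, hget2, List.set_append_right _ _ (by simp), hdrop, hlen]
    have hsub : m + 1 - (m + 1) = 0 := by omega
    have hv : nums[m] + pvS nums m = pvS nums (m + 1) := by
      rw [pvS_succ nums m hlt]; ring
    rw [hsub, List.set_cons_zero, hv]
    simp [List.range_succ]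

theorem pre_get (nums : List Int) (m k : Nat) (hm : m ≤ nums.length) (hk : k ≤ m) :
    PySem.List.pyGetD
      ((PySem.List.pyRange 1 (1 + (m : Int)) 1).foldl
        (fun ps i => PySem.List.pySetD ps i (PySem.List.pyGetD ps i 0 + PySem.List.pyGetD ps (i - 1) 0))
        (0 :: nums)) (k : Int) 0 = pvS nums k := by
  rw [pre_char nums m hm, PySem.List.pyGetD_natCast, List.getD_eq_getElem?_getD,
    List.getElem?_append_left (by simp; omega)]
  simp [List.getElem?_range (by omega : k < m + 1)]

-- A's res list (over a generalized prefix-sum list) equals pvF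
theorem resA_eq (nums pre : List Int) (m : Nat)
    (hget : forall k, k <= m -> PySem.List.pyGetD pre (k : Int) 0 = pvS nums k) :
    (PySem.List.pyRange 0 (m : Int) 1).foldl
      (fun acc i => (PySem.List.pyRange (i + 1) ((m : Int) + 1) 1).foldl
        (fun acc2 j => acc2 ++ [PySem.List.pyGetD pre j 0 - PySem.List.pyGetD pre i 0]) acc)
      []
    = pvF nums m := by
  simp only [PySem.List.foldl_append_singleton_eq_map, PySem.List.foldl_append_eq_flatMap,
    List.nil_append]
  rw [PySem.List.pyRange_one 0 (m : Int)]
  simp only [List.flatMap_map]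
  rw [pvF]
  have hm0 : ((m : Int) - 0).toNat = m := by omega
  rw [hm0]
  apply List.flatMap_congr
  intro i hi
  rw [List.mem_range] at hi
  rw [PySem.List.pyRange_one (0 + (i : Int) + 1) ((m : Int) + 1)]
  have h1 : (((m : Int) + 1) - (0 + (i : Int) + 1)).toNat = m - i := by omega
  rw [h1]
  simp only [List.map_map]
  apply List.map_congr_left
  intro t ht
  rw [List.mem_range] at ht
  simp only [Function.comp]
  have hj : (0 + (i : Int) + 1 + (t : Int)) = ((i + 1 + t : Nat) : Int) := by push_cast; ring
  have hi2 : (0 + (i : Int)) = ((i : Nat) : Int) := by ring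
  rw [hj, hi2, hget (i + 1 + t) (by omega), hget i (by omega)]

-- B's fold state after the first m elements
theorem stB_eq (nums : List Int) (m : Nat) (hm : m ≤ nums.length) :
    (PySem.List.pyRange 0 (m : Int) 1).foldl
      (fun (st : List Int × List Int) j =>
        let x := PySem.List.pyGetD nums j 0
        let ending := st.2.map (fun s => s + x) ++ [x]
        (st.1 ++ ending, ending))
      ([], [])
    = (pvB nums m, pvE nums m) := by
  induction m with
  | zero => simp [pvB, pvE]
  | succ m ih =>
    have hm' : m ≤ nums.length := by omega
    have hlt : m < nums.length := by omega
    have hsplit : ((m + 1 : Nat) : Int) = (m : Int) + 1 := by omega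
    rw [hsplit, PySem.List.pyRange_one_succ_right (by omega : (0:Int) ≤ (m:Int)),
        List.foldl_append, ih hm']
    have hx : PySem.List.pyGetD nums ((m : Nat) : Int) 0 = nums[m] := by
      rw [PySem.List.pyGetD_natCast, List.getD_eq_getElem?_getD, List.getElem?_eq_getElem hlt]
      rfl
    simp only [List.foldl_cons, List.foldl_nil, hx]
    have hE : (pvE nums m).map (fun s => s + nums[m]) ++ [nums[m]] = pvE nums (m + 1) := by
      simp only [pvE, List.map_map, List.range_succ, List.map_append, List.map_cons, List.map_nil]
      congr 1
      · apply List.map_congr_left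
        intro i hi
        simp only [Function.comp]
        rw [pvS_succ nums m hlt]; ring
      · simp [pvS_succ nums m hlt]
    rw [hE]
    have hB : pvB nums m ++ pvE nums (m + 1) = pvB nums (m + 1) := by
      simp [pvB, List.range_succ]
    rw [hB]

-- the transpose permutation: grouped-by-start ~ grouped-by-end
theorem pvF_perm_pvB (nums : List Int) (m : Nat) : (pvF nums m).Perm (pvB nums m) := by
  induction m with
  | zero => simp [pvF, pvB]
  | succ m ih =>
    have hF : pvF nums (m + 1) =
        ((List.range m).flatMap (fun i =>
          (List.range (m - i)).map (fun t => pvS nums (i + 1 + t) - pvS nums i)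
          ++ [pvS nums (m + 1) - pvS nums i]))
        ++ [pvS nums (m + 1) - pvS nums m] := by
      rw [pvF, List.range_succ, List.flatMap_append]
      congr 1
      · apply List.flatMap_congr
        intro i hi
        rw [List.mem_range] at hi
        have h1 : m + 1 - i = (m - i) + 1 := by omega
        rw [h1, List.range_succ, List.map_append]
        congr 2
        have : i + 1 + (m - i) = m + 1 := by omega
        simp [this]
      · have : m + 1 - m = 1 := by omega
        simp [this, List.range_succ]
    rw [hF]
    have h2 := List.flatMap_append_perm (List.range m)
      (fun i => (List.range (m - i)).map (fun t => pvS nums (i + 1 + t) - pvS nums i))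
      (fun i => [pvS nums (m + 1) - pvS nums i])
    refine List.Perm.trans (List.Perm.append_right _ h2.symm) ?_
    have h3 : (List.range m).flatMap (fun i => [pvS nums (m + 1) - pvS nums i])
        ++ [pvS nums (m + 1) - pvS nums m] = pvE nums (m + 1) := by
      rw [← List.map_eq_flatMap]
      simp [pvE, List.range_succ]
    have hB : pvB nums (m + 1) = pvB nums m ++ pvE nums (m + 1) := by
      simp [pvB, List.range_succ]
    rw [List.append_assoc, h3, hB]
    exact List.Perm.append_right _ (by rw [← pvF]; exact ih)

-- ===== VERDICT (by name: the statement is the Claim_ definition above) =====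
theorem rangeSum_spec : Claim_equal_rangeSum := by
  intro nums n left right _hdom hpre
  unfold Spec_rangeSum
  show rangeSum nums n left right = rangeSum_alt nums n left right
  unfold rangeSum rangeSum_alt
  simp only []
  by_cases hn : n <= 0
  · rw [PySem.List.pyRange_one_eq_nil hn, PySem.List.pyRange_one_eq_nil (by omega : 1 + n <= 1)]
    simp
  · have hn' : n = ((n.toNat : Nat) : Int) := by omega
    have hm : n.toNat <= nums.length := by
      unfold Pre_rangeSum at hpre; omega
    rw [hn']
    rw [resA_eq nums _ n.toNat (fun k hk => pre_get nums n.toNat k hm hk),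
        stB_eq nums n.toNat hm]
    have hperm := PySem.List.sorted_eq_sorted_of_perm (pvF nums n.toNat) (pvB nums n.toNat)
      (fun x => x) (fun a b h => h) (pvF_perm_pvB nums n.toNat)
    simp only [hperm]
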